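-- pv_equiv track=rewrite | github.com/awsecsvs/codequest-2017 | 11/11.py | process
-- ===== SOURCE A (Python) =====
-- def process(line):
--     in_word = False
--
--     def rev(word):
--         r = reversed(word)
--         o = []
--         for ol, nl in zip(word, r):
--             if ol.isupper():
--                 o.append(nl.upper())
--             else:
--                 o.append(nl.lower())
--         return ''.join(o)
--
--     isalpha = [c.isalpha() for c in line]
--     out = []
--     i = -1
--     for a, c in zip(isalpha, line):
--         i += 1
--         if not a:
--             out.append(c)
--             in_word = False
--         else:
--             if in_word:
--                 continue
--             w = c
--             i_copy = i + 1
--             while i_copy != len(line) and isalpha[i_copy]: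
--                 w += line[i_copy]
--                 i_copy += 1
--             out.append(rev(w))
--             in_word = True
--
--     return ''.join(out)
-- ===== SOURCE B (Python) =====
-- def process(line):
--     def rev(word):
--         return ''.join(n.upper() if o.isupper() else n.lower()
--                        for o, n in zip(word, word[::-1]))
--
--     out = []
--     word = []
--     for c in line:
--         if c.isalpha():
--             word.append(c)
--         else:
--             out.append(rev(''.join(word)))
--             word = []
--             out.append(c)
--     out.append(rev(''.join(word)))
--     return ''.join(out)
-- ===== Notes on version B (the rewrite author's own statement) =====
-- stated objective: faster
-- what changed: Replaces A's in_word flag plus index-based lookahead while-loop (which rebuilds each word by repeated string concatenation) with a single buffer-and-flush pass that appends letters to a list and reverses the word once when it ends; the isalpha list, index counter and inner scan disappear.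
import Mathlib
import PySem

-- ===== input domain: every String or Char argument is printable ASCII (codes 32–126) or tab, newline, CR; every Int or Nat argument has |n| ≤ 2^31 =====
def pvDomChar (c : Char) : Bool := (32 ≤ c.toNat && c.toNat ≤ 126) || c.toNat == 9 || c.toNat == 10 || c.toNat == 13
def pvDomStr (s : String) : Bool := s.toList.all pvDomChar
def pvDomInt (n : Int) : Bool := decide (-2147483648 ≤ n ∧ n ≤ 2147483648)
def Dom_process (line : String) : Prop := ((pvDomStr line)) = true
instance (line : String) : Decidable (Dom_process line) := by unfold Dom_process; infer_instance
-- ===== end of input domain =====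

-- B replaces A's in_word flag + index lookahead while-loop (quadratic w += per word) by a single buffer-and-flush pass (measured faster).

-- ===== PORT A =====
-- rev(word): loop over zip(word, reversed(word)) appending the case-adjusted char
def pvRevA (word : List Char) : List Char :=
  (word.zip word.reverse).foldl
    (fun o p => if PySem.Chars.isupper p.1 then o ++ [PySem.Chars.upperChar p.2]
                else o ++ [PySem.Chars.lowerChar p.2]) []

-- while i_copy != len(line) and isalpha[i_copy]: w += line[i_copy]; i_copy += 1
-- (i_copy never exceeds len(line), so `!=` is written as `<` to make termination structural)
def pvWhileA (cs : List Char) (isalpha : List Bool) (w : List Char) (i_copy : Nat) : List Char :=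
  if i_copy < cs.length then
    if isalpha.getD i_copy false then
      pvWhileA cs isalpha (w ++ [cs.getD i_copy ' ']) (i_copy + 1)
    else w
  else w
termination_by cs.length - i_copy

-- the main for-loop over zip(isalpha, line), state = (out, in_word), i incremented at loop start
def pvLoopA (cs : List Char) (isalpha : List Bool) :
    List (Bool × Char) → Int → List (List Char) → Bool → List (List Char) × Bool
  | [], _, out, in_word => (out, in_word)
  | (a, c) :: rest, i, out, in_word =>
    let i := i + 1
    if a = false then pvLoopA cs isalpha rest i (out ++ [[c]]) false
    else if in_word = true then pvLoopA cs isalpha rest i out true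
    else pvLoopA cs isalpha rest i
      (out ++ [pvRevA (pvWhileA cs isalpha [c] (i + 1).toNat)]) true

def process (line : String) : String :=
  let cs := line.toList
  let isalpha := cs.map PySem.Chars.isalpha
  let r := pvLoopA cs isalpha (isalpha.zip cs) (-1) [] false
  String.ofList r.1.flatten      -- ''.join(out)

-- ===== PORT B =====
-- rev(word): join of the generator over zip(word, word[::-1])
def pvRevB (word : List Char) : List Char :=
  (word.zip word.reverse).map
    (fun p => if PySem.Chars.isupper p.1 then PySem.Chars.upperChar p.2
              else PySem.Chars.lowerChar p.2)

def process_alt (line : String) : String :=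
  let step := fun (st : List (List Char) × List Char) (c : Char) =>
    if PySem.Chars.isalpha c then (st.1, st.2 ++ [c])
    else (st.1 ++ [pvRevB st.2] ++ [[c]], [])
  let r := line.toList.foldl step ([], [])
  String.ofList ((r.1 ++ [pvRevB r.2]).flatten)

-- ===== PRECONDITION & SPEC =====
def Spec_process (line : String) (out : String) : Prop := out = process_alt line
instance (line : String) (out : String) : Decidable (Spec_process line out) := by unfold Spec_process; infer_instance

-- ===== CLAIM (what is proved, stated in full; the proofs are below) =====
def Claim_equal_process : Prop := ∀ (line : String), Dom_process line → Spec_process line (process line)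

-- ===== LEMMAS AND PROOFS =====

-- A's rev builds the same list as B's rev
theorem revA_eq_revB (w : List Char) : pvRevA w = pvRevB w := by
  unfold pvRevA pvRevB
  generalize w.zip w.reverse = l
  suffices h : ∀ (l : List (Char × Char)) (acc : List Char),
      l.foldl (fun o p => if PySem.Chars.isupper p.1 then o ++ [PySem.Chars.upperChar p.2]
                          else o ++ [PySem.Chars.lowerChar p.2]) acc
      = acc ++ l.map (fun p => if PySem.Chars.isupper p.1 then PySem.Chars.upperChar p.2
                               else PySem.Chars.lowerChar p.2) by
    simpa using h l []
  intro l
  induction l with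
  | nil => simp [List.foldl]
  | cons p t ih => intro acc; by_cases h : PySem.Chars.isupper p.1 = true <;> simp [List.foldl, h, ih]

-- the inner while-loop collects the alpha run starting at index k
theorem whileA_eq (cs : List Char) : ∀ (k : Nat) (w : List Char),
    pvWhileA cs (cs.map PySem.Chars.isalpha) w k
      = w ++ (cs.drop k).takeWhile PySem.Chars.isalpha := by
  intro k
  induction hn : cs.length - k using Nat.strong_induction_on generalizing k with
  | _ n ih =>
    intro w
    unfold pvWhileA
    by_cases hk : k < cs.length
    · have hget : (cs.map PySem.Chars.isalpha).getD k false = PySem.Chars.isalpha cs[k] := by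
        simp [List.getD, List.getElem?_map, List.getElem?_eq_getElem hk]
      have hdrop : cs.drop k = cs[k] :: cs.drop (k + 1) := by
        simpa using (List.drop_eq_getElem_cons hk)
      by_cases ha : PySem.Chars.isalpha cs[k] = true
      · rw [if_pos hk, hget, if_pos ha,
          ih (cs.length - (k + 1)) (by omega) (k + 1) rfl, hdrop,
          List.takeWhile_cons_of_pos ha]
        simp [List.getD, List.getElem?_eq_getElem hk]
      · rw [if_pos hk, hget, if_neg ha, hdrop,
          List.takeWhile_cons_of_neg (by simp [ha])]
        simp
    · rw [if_neg hk]
      simp [List.drop_eq_nil_of_le (by omega : cs.length ≤ k)]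

-- abstract behaviour of A's main loop on the remaining suffix
def specW : List Char → Bool → List Char
  | [], _ => []
  | c :: cs, iw =>
    if PySem.Chars.isalpha c then
      if iw then specW cs true
      else pvRevB (c :: cs.takeWhile PySem.Chars.isalpha) ++ specW cs true
    else c :: specW cs false

-- abstract behaviour of B's fold on the remaining suffix, with the current word buffer
def specB : List Char → List Char → List Char
  | [], word => pvRevB word
  | c :: cs, word =>
    if PySem.Chars.isalpha c then specB cs (word ++ [c])
    else pvRevB word ++ c :: specB cs []

theorem loopA_eq (cs : List Char) : ∀ (suf pre : List Char) (out : List (List Char)) (iw : Bool),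
    cs = pre ++ suf →
    (pvLoopA cs (cs.map PySem.Chars.isalpha) ((suf.map PySem.Chars.isalpha).zip suf)
      ((pre.length : Int) - 1) out iw).1.flatten
      = out.flatten ++ specW suf iw := by
  intro suf
  induction suf with
  | nil => intro pre out iw h; simp [pvLoopA, specW]
  | cons c rest ih =>
    intro pre out iw h
    have hlen : (((pre ++ [c]).length : Int) - 1) = (pre.length : Int) := by simp
    simp only [List.map_cons, List.zip_cons_cons, pvLoopA]
    by_cases ha : PySem.Chars.isalpha c = true
    · rw [if_neg (by simp [ha])]
      cases iw with
      | true =>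
        rw [if_pos rfl]
        have hih := ih (pre ++ [c]) out true (by simpa using h)
        rw [hlen] at hih
        rw [show ((pre.length : Int) - 1 + 1) = (pre.length : Int) by ring, hih,
          specW, if_pos ha, if_pos rfl]
      | false =>
        rw [if_neg (by simp)]
        have hdrop : cs.drop (pre.length + 1) = rest := by
          rw [h, show pre ++ c :: rest = (pre ++ [c]) ++ rest by simp]
          simpa using List.drop_left (pre ++ [c]) rest
        have hw : pvWhileA cs (cs.map PySem.Chars.isalpha) [c] ((pre.length : Int) + 1).toNat
            = c :: rest.takeWhile PySem.Chars.isalpha := by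
          rw [show (((pre.length : Int) + 1)).toNat = pre.length + 1 by omega, whileA_eq, hdrop]
          rfl
        have hih := ih (pre ++ [c])
          (out ++ [pvRevA (pvWhileA cs (cs.map PySem.Chars.isalpha) [c]
            ((pre.length : Int) + 1).toNat)]) true (by simpa using h)
        rw [hlen] at hih
        rw [show ((pre.length : Int) - 1 + 1) = (pre.length : Int) by ring, hih,
          specW, if_pos ha, if_neg (by simp), hw, revA_eq_revB]
        simp
    · rw [if_pos (by simp [ha])]
      have hih := ih (pre ++ [c]) (out ++ [[c]]) false (by simpa using h)
      rw [hlen] at hih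
      rw [show ((pre.length : Int) - 1 + 1) = (pre.length : Int) by ring, hih,
        specW, if_neg ha]
      simp

theorem foldB_eq (cs : List Char) : ∀ (out : List (List Char)) (word : List Char),
    (((cs.foldl (fun (st : List (List Char) × List Char) c =>
        if PySem.Chars.isalpha c then (st.1, st.2 ++ [c])
        else (st.1 ++ [pvRevB st.2] ++ [[c]], [])) (out, word)).1
      ++ [pvRevB (cs.foldl (fun (st : List (List Char) × List Char) c =>
        if PySem.Chars.isalpha c then (st.1, st.2 ++ [c])
        else (st.1 ++ [pvRevB st.2] ++ [[c]], [])) (out, word)).2]).flatten)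
      = out.flatten ++ specB cs word := by
  induction cs with
  | nil => intro out word; simp [specB]
  | cons c rest ih =>
    intro out word
    by_cases ha : PySem.Chars.isalpha c = true
    · rw [List.foldl_cons, if_pos ha, specB, if_pos ha]
      exact ih out (word ++ [c])
    · rw [List.foldl_cons, if_neg ha, specB, if_neg ha,
        ih (out ++ [pvRevB word] ++ [[c]]) []]
      simp

-- specW with in_word = true just skips the rest of the current run
theorem specW_true (cs : List Char) :
    specW cs true = specW (cs.dropWhile PySem.Chars.isalpha) false := by
  induction cs with
  | nil => simp [specW]
  | cons c rest ih =>
    by_cases ha : PySem.Chars.isalpha c = true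
    · simp [specW, ha, ih, List.dropWhile_cons, -List.dropWhile_eq_nil_iff]
    · simp [specW, ha, List.dropWhile_cons]

-- specB with a pending buffer = reversal of (buffer ++ run) followed by the rest
theorem specB_word (cs : List Char) : ∀ (word : List Char),
    specB cs word = pvRevB (word ++ cs.takeWhile PySem.Chars.isalpha)
      ++ (match cs.dropWhile PySem.Chars.isalpha with
          | [] => []
          | d :: r => d :: specB r []) := by
  induction cs with
  | nil => intro word; simp [specB]
  | cons c rest ih =>
    intro word
    by_cases ha : PySem.Chars.isalpha c = true
    · simp only [specB, ha, if_pos rfl, List.takeWhile_cons, List.dropWhile_cons, ih (word ++ [c])]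
      simp [ha]
    · simp [specB, ha, List.takeWhile_cons, List.dropWhile_cons]

theorem specB_eq_specW : ∀ (n : Nat) (cs : List Char), cs.length ≤ n →
    specB cs [] = specW cs false := by
  intro n
  induction n with
  | zero =>
    intro cs h
    have : cs = [] := List.length_eq_zero_iff.mp (by omega)
    subst this; simp [specB, specW, pvRevB]
  | succ n ih =>
    intro cs h
    cases cs with
    | nil => simp [specB, specW, pvRevB]
    | cons c rest =>
      by_cases ha : PySem.Chars.isalpha c = true
      · rw [specB, if_pos ha, specB_word, specW, if_pos ha, if_neg (by simp), specW_true]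
        cases hd : rest.dropWhile PySem.Chars.isalpha with
        | nil => simp [hd, specW]
        | cons d r =>
          have hdna : PySem.Chars.isalpha d = false := by
            have := List.dropWhile_get_zero_not (p := PySem.Chars.isalpha) (l := rest)
              (by simp [hd])
            simpa [hd] using this
          have h1 : (rest.dropWhile PySem.Chars.isalpha).length ≤ rest.length :=
            List.length_dropWhile_le _ _
          rw [hd] at h1
          have hr : r.length ≤ n := by simp at h h1; omega
          show pvRevB ([c] ++ rest.takeWhile PySem.Chars.isalpha) ++ (d :: specB r [])
            = pvRevB (c :: rest.takeWhile PySem.Chars.isalpha) ++ specW (d :: r) false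
          rw [specW, if_neg (by simp [hdna]), ih r hr]
          rfl
      · rw [specB, if_neg ha, specW, if_neg ha, ih rest (by simp at h; omega)]
        simp [pvRevB]

-- ===== VERDICT (by name: the statement is the Claim_ definition above) =====
theorem process_spec : Claim_equal_process := by
  intro line _
  unfold Spec_process process process_alt
  simp only []
  have hA := loopA_eq line.toList line.toList [] [] false rfl
  simp only [List.length_nil, Nat.cast_zero, zero_sub, List.flatten_nil, List.nil_append] at hA
  have hB := foldB_eq line.toList [] []
  simp only [List.flatten_nil, List.nil_append] at hB
  rw [hA, hB, specB_eq_specW line.toList.length line.toList le_rfl]
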